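-- pv_equiv track=rewrite | github.com/ignaciomgy/python | Tests/textDbg.py | ej4_lvl2
-- ===== SOURCE A (Python) =====
-- def ej4_lvl2(arr):
--     result, i=0,0
--     ban = False
--     while len(arr) > i:
--         if arr[i] == 6:
--             ban=True
--             i+=1
--             continue
--         elif arr[i] == 9 and ban:
--             i+=1
--             ban = False
--             continue
--         elif ban == False:
--             result += arr[i]
--         i+=1
--
--     return result
-- ===== SOURCE B (Python) =====
-- def ej4_lvl2(arr):
--     total = 0
--     rest = arr
--     while rest:
--         if 6 in rest:
--             k = rest.index(6)
--             total += sum(rest[:k])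
--             rest = rest[k + 1:]
--             rest = rest[rest.index(9) + 1:] if 9 in rest else []
--         else:
--             total += sum(rest)
--             rest = []
--     return total
-- ===== Notes on version B (the rewrite author's own statement) =====
-- stated objective: faster
-- what changed: Replaces A's element-by-element scan with a persistent ban flag by a segment-splitting loop: repeatedly find the next 6 with index(), add sum() of the visible prefix slice, and cut the list past the matching 9 (or to the end); no flag and no per-element interpreted branch.
import Mathlib
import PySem

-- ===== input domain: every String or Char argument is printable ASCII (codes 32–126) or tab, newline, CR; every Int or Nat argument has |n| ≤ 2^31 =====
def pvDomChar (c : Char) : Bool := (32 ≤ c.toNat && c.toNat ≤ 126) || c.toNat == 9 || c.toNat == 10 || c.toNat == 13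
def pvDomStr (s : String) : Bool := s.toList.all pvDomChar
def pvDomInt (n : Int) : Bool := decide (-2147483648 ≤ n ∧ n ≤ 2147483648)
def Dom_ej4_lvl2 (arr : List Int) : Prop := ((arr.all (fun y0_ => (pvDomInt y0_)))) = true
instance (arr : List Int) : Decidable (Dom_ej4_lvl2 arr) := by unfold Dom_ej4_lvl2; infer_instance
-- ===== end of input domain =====

-- B replaces A's per-element scan with ban flag by a segment-splitting loop (index/sum/slices); measured faster in a timing run (constant factor).

-- ===== PORT A =====
-- A's while loop over index i with state (result, ban), transliterated as structural
-- recursion over the remaining suffix of arr (branches in A's order).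
def ej4_lvl2.go : List Int → Bool → Int → Int
  | [], _, result => result
  | x :: rest, ban, result =>
    if x = 6 then ej4_lvl2.go rest true result
    else if x = 9 ∧ ban then ej4_lvl2.go rest false result
    else if ban = false then ej4_lvl2.go rest ban (result + x)
    else ej4_lvl2.go rest ban result

def ej4_lvl2 (arr : List Int) : Int := ej4_lvl2.go arr false 0

-- ===== PORT B =====
-- Source B's 'while rest:' loop. Slices rest[:k] / rest[k+1:] are ported as take/drop:
-- exact here because the bounds are list.index results, hence natural and ≤ len(rest).
def ej4_lvl2_alt.loop (total : Int) (rest : List Int) : Int :=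
  if _hne : rest = [] then total
  else if _h6 : 6 ∈ rest then
    let k := rest.idxOf 6            -- k = rest.index(6), defined since 6 in rest
    let total' := total + (rest.take k).sum
    let rest' := rest.drop (k + 1)
    let rest'' := if 9 ∈ rest' then rest'.drop (rest'.idxOf 9 + 1) else []
    ej4_lvl2_alt.loop total' rest''
  else
    ej4_lvl2_alt.loop (total + rest.sum) []
termination_by rest.length
decreasing_by
  · have hk : rest.idxOf 6 < rest.length := List.idxOf_lt_length_of_mem _h6
    split
    · simp only [List.length_drop]; omega
    · simp only [List.length_nil]
      exact Nat.pos_of_ne_zero (fun h => _hne (List.eq_nil_of_length_eq_zero h))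
  · simp only [List.length_nil]
    exact Nat.pos_of_ne_zero (fun h => _hne (List.eq_nil_of_length_eq_zero h))

def ej4_lvl2_alt (arr : List Int) : Int := ej4_lvl2_alt.loop 0 arr

-- ===== PRECONDITION & SPEC =====
def Spec_ej4_lvl2 (arr : List Int) (out : Int) : Prop := out = ej4_lvl2_alt arr
instance (arr : List Int) (out : Int) : Decidable (Spec_ej4_lvl2 arr out) := by unfold Spec_ej4_lvl2; infer_instance

-- ===== CLAIM (what is proved, stated in full; the proofs are below) =====
def Claim_equal_ej4_lvl2 : Prop := ∀ (arr : List Int), Dom_ej4_lvl2 arr → Spec_ej4_lvl2 arr (ej4_lvl2 arr)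

-- ===== LEMMAS AND PROOFS =====

-- the effect of a banned segment: drop up to and including the first 9 (or everything)
def skip9 (xs : List Int) : List Int :=
  if 9 ∈ xs then xs.drop (xs.idxOf 9 + 1) else []

-- A while banned ignores everything up to and including the first 9
theorem go_true_eq (xs : List Int) : ∀ t : Int,
    ej4_lvl2.go xs true t = ej4_lvl2.go (skip9 xs) false t := by
  induction xs with
  | nil => intro t; simp [ej4_lvl2.go, skip9]
  | cons x rest ih =>
    intro t
    by_cases h9 : x = 9
    · subst h9
      simp [ej4_lvl2.go, skip9, List.idxOf_cons_self]
    · have hmem : (9 ∈ x :: rest) ↔ (9 ∈ rest) := by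
        constructor
        · intro h; rcases List.mem_cons.mp h with h | h
          · exact absurd h.symm h9
          · exact h
        · exact fun h => List.mem_cons_of_mem _ h
      have hskip : skip9 (x :: rest) = skip9 rest := by
        unfold skip9
        by_cases hm : 9 ∈ rest
        · rw [if_pos (hmem.mpr hm), if_pos hm, List.idxOf_cons_ne _ h9]
          simp
        · rw [if_neg (fun h => hm (hmem.mp h)), if_neg hm]
      rw [hskip]
      by_cases h6 : x = 6
      · subst h6; simp only [ej4_lvl2.go]; exact ih t
      · simp only [ej4_lvl2.go, if_neg h6]
        rw [if_neg (by simp [h9]), if_neg (by decide : ¬ (true = false))]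
        exact ih t

-- unfolding lemma for B's loop at a leading 6
theorem loop_cons_six (xs : List Int) (t : Int) :
    ej4_lvl2_alt.loop t (6 :: xs) = ej4_lvl2_alt.loop t (skip9 xs) := by
  rw [ej4_lvl2_alt.loop]
  simp only [List.cons_ne_nil, dite_false, List.mem_cons, true_or, dite_true,
    List.idxOf_cons_self, List.take_zero, List.sum_nil, add_zero, List.drop_succ_cons,
    List.drop_zero, skip9]

-- unfolding lemma for B's loop at a leading non-6 element
theorem loop_base (s : Int) : ej4_lvl2_alt.loop s [] = s := by
  rw [ej4_lvl2_alt.loop]; simp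

theorem loop_cons_ne (x : Int) (xs : List Int) (t : Int) (hx : x ≠ 6) :
    ej4_lvl2_alt.loop t (x :: xs) = ej4_lvl2_alt.loop (t + x) xs := by
  conv_lhs => rw [ej4_lvl2_alt.loop]
  have hmem : (6 ∈ x :: xs) ↔ (6 ∈ xs) := by
    constructor
    · intro h; rcases List.mem_cons.mp h with h | h
      · exact absurd h.symm hx
      · exact h
    · exact fun h => List.mem_cons_of_mem _ h
  by_cases h6 : 6 ∈ xs
  · have hne : xs ≠ [] := by rintro rfl; simp at h6
    rw [dif_neg (List.cons_ne_nil x xs), dif_pos (hmem.mpr h6)]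
    conv_rhs => rw [ej4_lvl2_alt.loop]
    rw [dif_neg hne, dif_pos h6]
    simp only [List.idxOf_cons_ne _ hx, List.take_succ_cons, List.sum_cons,
      List.drop_succ_cons]
    congr 1
    ring
  · rw [dif_neg (List.cons_ne_nil x xs), dif_neg (fun h => h6 (hmem.mp h)), loop_base]
    rcases eq_or_ne xs [] with rfl | hne
    · rw [loop_base]; simp
    · conv_rhs => rw [ej4_lvl2_alt.loop]
      rw [dif_neg hne, dif_neg h6, loop_base]
      simp [add_assoc]

-- main invariant: A's loop in the un-banned state equals B's loop, by strong induction on length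
theorem go_false_eq_loop : ∀ (n : ℕ) (xs : List Int), xs.length ≤ n → ∀ t : Int,
    ej4_lvl2.go xs false t = ej4_lvl2_alt.loop t xs := by
  intro n
  induction n with
  | zero =>
    intro xs hlen t
    have : xs = [] := List.length_eq_zero_iff.mp (Nat.le_zero.mp hlen)
    subst this
    simp [ej4_lvl2.go, ej4_lvl2_alt.loop]
  | succ n ih =>
    intro xs hlen t
    match xs with
    | [] => simp [ej4_lvl2.go, ej4_lvl2_alt.loop]
    | x :: rest =>
      by_cases h6 : x = 6
      · subst h6
        simp only [ej4_lvl2.go]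
        rw [go_true_eq, loop_cons_six]
        apply ih
        have hle : (skip9 rest).length ≤ rest.length := by
          unfold skip9; split
          · simp only [List.length_drop]; omega
          · simp
        simp at hlen; omega
      · have hstep : ej4_lvl2.go (x :: rest) false t = ej4_lvl2.go rest false (t + x) := by
          simp [ej4_lvl2.go, h6]
        rw [hstep, loop_cons_ne x rest t h6]
        apply ih
        simp at hlen; omega
      
-- ===== VERDICT (by name: the statement is the Claim_ definition above) =====
theorem ej4_lvl2_spec : Claim_equal_ej4_lvl2 := by
  intro arr _
  unfold Spec_ej4_lvl2 ej4_lvl2 ej4_lvl2_alt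
  exact go_false_eq_loop arr.length arr le_rfl 0
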